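-- pv_equiv track=rewrite | github.com/benquick123/code-profiling | code/batch-1/vse-naloge-brez-testov/DN7-M-118.py | varen_premik
-- ===== SOURCE A (Python) =====
-- def varen_premik(x0, y0, x1, y1, mine):
--     """
--     Vrni `True`, če je pomik z (x0, y0) and (x1, y1) varen, `False`, če ni.
--
--     Args:
--         x0 (int): koordinata x začetnega polja
--         y0 (int): koordinata y začetnega polja
--         x1 (int): koordinata x končnega polja
--         y1 (int): koordinata y končnega polja
--         mine (set of tuple of int): koordinate min
--
--     Returns:
--         bool: `True`, če je premik varen, `False`, če ni.
--     """
--     #mine1 = {(3, 0), (1, 1), (6, 1), (1, 2), (2, 2), (6, 3)}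
--
--     if y0 == y1:
--         p = min([x0, x1])
--         c = max([x0, x1])
--         pot = [(x, y0) for x in range(p, c + 1)]
--     else:
--         p = min([y0, y1])
--         c = max([y0, y1])
--         pot = [(x0, y) for y in range(p, c + 1)]
--
--
--     for polje in pot:
--         if polje in mine:
--             return False
--     else:
--         return True
-- ===== SOURCE B (Python) =====
-- def varen_premik(x0, y0, x1, y1, mine):
--     if y0 == y1:
--         lo, hi = (x0, x1) if x0 <= x1 else (x1, x0)
--         return not any(my == y0 and lo <= mx <= hi for (mx, my) in mine)
--     lo, hi = (y0, y1) if y0 <= y1 else (y1, y0)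
--     return not any(mx == x0 and lo <= my <= hi for (mx, my) in mine)
-- ===== Notes on version B (the rewrite author's own statement) =====
-- stated objective: faster
-- what changed: Instead of materialising every square of the path and scanning the mine set per square, B iterates once over the mines and tests each mine's coordinates against the segment's bounds.
import Mathlib
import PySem

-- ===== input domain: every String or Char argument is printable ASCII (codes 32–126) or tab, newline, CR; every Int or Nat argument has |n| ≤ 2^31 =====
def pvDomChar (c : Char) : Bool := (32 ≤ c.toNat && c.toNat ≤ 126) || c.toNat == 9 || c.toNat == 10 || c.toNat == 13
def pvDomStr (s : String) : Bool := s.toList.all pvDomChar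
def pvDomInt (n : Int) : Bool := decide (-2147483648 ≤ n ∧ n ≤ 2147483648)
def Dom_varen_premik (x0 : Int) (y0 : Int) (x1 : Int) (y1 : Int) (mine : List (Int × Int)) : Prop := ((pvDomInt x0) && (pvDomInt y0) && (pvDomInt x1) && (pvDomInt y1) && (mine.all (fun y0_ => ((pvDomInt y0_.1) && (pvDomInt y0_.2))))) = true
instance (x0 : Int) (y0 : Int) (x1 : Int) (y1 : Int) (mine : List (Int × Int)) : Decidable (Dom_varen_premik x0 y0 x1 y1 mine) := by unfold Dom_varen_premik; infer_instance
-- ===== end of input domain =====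

-- B scans the mine list once instead of materialising the path and scanning it square by square.
-- ===== PORT A =====
-- A's for-loop over the path list, returning False at the first mined square.
def pvLoopA (pot : List (Int × Int)) (mine : List (Int × Int)) : Bool :=
  match pot with
  | [] => true
  | p :: rest => if mine.contains p then false else pvLoopA rest mine

def varen_premik (x0 : Int) (y0 : Int) (x1 : Int) (y1 : Int) (mine : List (Int × Int)) : Bool :=
  let pot :=
    if y0 == y1 then
      (PySem.List.pyRange (min x0 x1) (max x0 x1 + 1) 1).map (fun x => (x, y0))
    else
      (PySem.List.pyRange (min y0 y1) (max y0 y1 + 1) 1).map (fun y => (x0, y))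
  pvLoopA pot mine

-- ===== PORT B =====
-- B scans the mines once, testing each against the segment's bounds (no path list).
def varen_premik_alt (x0 : Int) (y0 : Int) (x1 : Int) (y1 : Int) (mine : List (Int × Int)) : Bool :=
  if y0 == y1 then
    let lh := if x0 ≤ x1 then (x0, x1) else (x1, x0)
    ! mine.any (fun m => m.2 == y0 && decide (lh.1 ≤ m.1) && decide (m.1 ≤ lh.2))
  else
    let lh := if y0 ≤ y1 then (y0, y1) else (y1, y0)
    ! mine.any (fun m => m.1 == x0 && decide (lh.1 ≤ m.2) && decide (m.2 ≤ lh.2))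

-- ===== PRECONDITION & SPEC =====
def Spec_varen_premik (x0 : Int) (y0 : Int) (x1 : Int) (y1 : Int) (mine : List (Int × Int)) (out : Bool) : Prop := out = varen_premik_alt x0 y0 x1 y1 mine
instance (x0 : Int) (y0 : Int) (x1 : Int) (y1 : Int) (mine : List (Int × Int)) (out : Bool) : Decidable (Spec_varen_premik x0 y0 x1 y1 mine out) := by unfold Spec_varen_premik; infer_instance

-- ===== CLAIM (what is proved, stated in full; the proofs are below) =====
def Claim_equal_varen_premik : Prop := ∀ (x0 : Int) (y0 : Int) (x1 : Int) (y1 : Int) (mine : List (Int × Int)), Dom_varen_premik x0 y0 x1 y1 mine → Spec_varen_premik x0 y0 x1 y1 mine (varen_premik x0 y0 x1 y1 mine)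

-- ===== LEMMAS AND PROOFS =====


theorem pvLoopA_eq (pot mine : List (Int × Int)) :
    pvLoopA pot mine = ! pot.any (fun p => mine.contains p) := by
  induction pot with
  | nil => rfl
  | cons p rest ih =>
    simp only [pvLoopA, List.any_cons, Bool.not_or, ih]
    by_cases h : p ∈ mine <;> simp [h]

theorem varen_premik_eq (x0 y0 x1 y1 : Int) (mine : List (Int × Int)) :
    varen_premik x0 y0 x1 y1 mine = varen_premik_alt x0 y0 x1 y1 mine := by
  unfold varen_premik varen_premik_alt
  by_cases hy : y0 = y1
  · subst hy
    by_cases hx : x0 ≤ x1 <;>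
      simp only [beq_self_eq_true, if_true, hx, if_false, pvLoopA_eq] <;>
      rw [Bool.not_inj_iff, Bool.eq_iff_iff] <;>
      simp only [List.any_eq_true, List.mem_map, List.contains_iff_mem,
        PySem.List.mem_pyRange_one, Bool.and_eq_true, beq_iff_eq, decide_eq_true_eq] <;>
      constructor
    · rintro ⟨p, ⟨x, ⟨h1, h2⟩, rfl⟩, hpm⟩
      exact ⟨(x, y0), hpm, ⟨rfl, by omega⟩, by omega⟩
    · rintro ⟨m, hm, ⟨hmy, h1⟩, h2⟩
      refine ⟨m, ⟨m.1, ⟨by omega, by omega⟩, ?_⟩, hm⟩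
      rw [← hmy]
    · rintro ⟨p, ⟨x, ⟨h1, h2⟩, rfl⟩, hpm⟩
      exact ⟨(x, y0), hpm, ⟨rfl, by omega⟩, by omega⟩
    · rintro ⟨m, hm, ⟨hmy, h1⟩, h2⟩
      refine ⟨m, ⟨m.1, ⟨by omega, by omega⟩, ?_⟩, hm⟩
      rw [← hmy]
  · have hy' : (y0 == y1) = false := by simp [hy]
    by_cases hle : y0 ≤ y1 <;>
      simp only [hy', Bool.false_eq_true, if_false, hle, if_true, pvLoopA_eq] <;>
      rw [Bool.not_inj_iff, Bool.eq_iff_iff] <;>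
      simp only [List.any_eq_true, List.mem_map, List.contains_iff_mem,
        PySem.List.mem_pyRange_one, Bool.and_eq_true, beq_iff_eq, decide_eq_true_eq] <;>
      constructor
    · rintro ⟨p, ⟨y, ⟨h1, h2⟩, rfl⟩, hpm⟩
      exact ⟨(x0, y), hpm, ⟨rfl, by omega⟩, by omega⟩
    · rintro ⟨m, hm, ⟨hmx, h1⟩, h2⟩
      refine ⟨m, ⟨m.2, ⟨by omega, by omega⟩, ?_⟩, hm⟩
      rw [← hmx]
    · rintro ⟨p, ⟨y, ⟨h1, h2⟩, rfl⟩, hpm⟩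
      exact ⟨(x0, y), hpm, ⟨rfl, by omega⟩, by omega⟩
    · rintro ⟨m, hm, ⟨hmx, h1⟩, h2⟩
      refine ⟨m, ⟨m.2, ⟨by omega, by omega⟩, ?_⟩, hm⟩
      rw [← hmx]

-- ===== VERDICT (by name: the statement is the Claim_ definition above) =====
theorem varen_premik_spec : Claim_equal_varen_premik := by
  intro x0 y0 x1 y1 mine _
  exact varen_premik_eq x0 y0 x1 y1 mine
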